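-- pv_equiv track=rewrite | github.com/zoutei/TSST_Syndiff_Core | smart_padding.py | parse_skycell_name
-- ===== SOURCE A (Python) =====
-- from typing import Dict, List, Tuple, Optional, Union
--
-- def parse_skycell_name(filename: str) -> Tuple[str, str]:
--     """
--     Extract projection and cell ID from filename.
--
--     Args:
--         filename: PS1 filename containing skycell info
--
--     Returns:
--         Tuple of (projection, cell_id)
--     """
--     # Example: rings.v3.skycell.2522.091.stk.r.unconv.fits
--     parts = filename.split('.')
--     for i, part in enumerate(parts):
--         if part == 'skycell' and i + 2 < len(parts):
--             projection = parts[i + 1]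
--             cell_id = parts[i + 2]
--             return projection, cell_id
--
--     raise ValueError(f"Could not parse skycell info from filename: {filename}")
-- ===== SOURCE B (Python) =====
-- def _from(s, start):
--     tail = s[start:]
--     k = tail.find('.')
--     if k == -1:
--         raise ValueError(f"Could not parse skycell info from filename: {s}")
--     rest = tail[k + 1:]
--     m = rest.find('.')
--     if m == -1:
--         return tail[:k], rest
--     return tail[:k], rest[:m]
--
--
-- def parse_skycell_name(filename: str):
--     if filename.startswith('skycell.'):
--         return _from(filename, 8)
--     d = filename.find('.skycell.')
--     if d == -1:
--         raise ValueError(f"Could not parse skycell info from filename: {filename}")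
--     return _from(filename, d + 9)
-- ===== Notes on version B (the rewrite author's own statement) =====
-- stated objective: alternative
-- what changed: B never splits the filename and has no loop: it locates the 'skycell' token directly in the raw string with startswith/find and cuts out the two following dot-separated fields with slices, instead of A's split('.') plus an indexed scan over the parts.
import Mathlib
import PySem

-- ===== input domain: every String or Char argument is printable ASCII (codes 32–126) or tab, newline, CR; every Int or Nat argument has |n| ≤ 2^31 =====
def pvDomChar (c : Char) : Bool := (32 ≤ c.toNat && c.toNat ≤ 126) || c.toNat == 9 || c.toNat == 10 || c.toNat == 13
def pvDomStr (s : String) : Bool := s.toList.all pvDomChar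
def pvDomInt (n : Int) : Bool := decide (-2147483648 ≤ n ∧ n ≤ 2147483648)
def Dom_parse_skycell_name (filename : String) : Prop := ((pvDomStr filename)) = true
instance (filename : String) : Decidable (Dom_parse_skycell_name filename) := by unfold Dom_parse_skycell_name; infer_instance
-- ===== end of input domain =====

-- B parses the filename in place with startswith/find/slices instead of A's split('.') + indexed loop
-- (alternative decomposition, same cost); on inputs where A raises ValueError, B raises the same error
-- (those inputs are outside Pre_).


-- ===== PORT A =====
-- the 'for i, part in enumerate(parts)' loop; '[]' is the fall-through to the raise (excluded by Pre_)
def goA (full : List String) (i : Nat) : List String → String × String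
  | [] => ("", "")  -- raise ValueError (excluded by Pre_)
  | part :: rest =>
    if part = "skycell" ∧ (i : Int) + 2 < PySem.List.len full then
      (PySem.List.pyGetD full ((i : Int) + 1) "", PySem.List.pyGetD full ((i : Int) + 2) "")
    else goA full (i + 1) rest

def parse_skycell_name (filename : String) : String × String :=
  let parts := (PySem.Str.split? filename ".").getD []   -- filename.split('.'); sep ≠ "" so never none
  goA parts 0 parts

-- ===== PORT B =====
def altFrom (s : String) (start : Int) : String × String :=
  let tail := PySem.Str.slice s (some start) none
  let k := PySem.Str.find tail "."
  if k = -1 then ("", "")  -- raise ValueError (excluded by Pre_)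
  else
    let rest := PySem.Str.slice tail (some (k + 1)) none
    let m := PySem.Str.find rest "."
    if m = -1 then (PySem.Str.slice tail none (some k), rest)
    else (PySem.Str.slice tail none (some k), PySem.Str.slice rest none (some m))

def parse_skycell_name_alt (filename : String) : String × String :=
  if PySem.Str.startswith filename "skycell." then altFrom filename 8
  else
    let d := PySem.Str.find filename ".skycell."
    if d = -1 then ("", "")  -- raise ValueError (excluded by Pre_)
    else altFrom filename (d + 9)

-- ===== PRECONDITION & SPEC =====
-- Pre_ holds exactly when some dot-separated part equals 'skycell' with two further parts after it;
-- on all other inputs Python A (and B alike) raises ValueError.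
def Pre_parse_skycell_name (filename : String) : Prop :=
  ∃ pr ∈ ((PySem.Str.split? filename ".").getD []).zipIdx,
    pr.1 = "skycell" ∧ pr.2 + 2 < ((PySem.Str.split? filename ".").getD []).length
instance (filename : String) : Decidable (Pre_parse_skycell_name filename) := by
  unfold Pre_parse_skycell_name; infer_instance
def pvWitness_parse_skycell_name : String := "rings.v3.skycell.2522.091.fits"

def Spec_parse_skycell_name (filename : String) (out : String × String) : Prop :=
  out = parse_skycell_name_alt filename
instance (filename : String) (out : String × String) : Decidable (Spec_parse_skycell_name filename out) := by
  unfold Spec_parse_skycell_name; infer_instance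

-- ===== CLAIM (what is proved, stated in full; the proofs are below) =====
def Claim_equal_parse_skycell_name : Prop :=
  ∀ (filename : String), Dom_parse_skycell_name filename → Pre_parse_skycell_name filename →
    Spec_parse_skycell_name filename (parse_skycell_name filename)

-- ===== LEMMAS AND PROOFS =====

-- 'skycell' as a list of characters
def skc : List Char := ['s', 'k', 'y', 'c', 'e', 'l', 'l']
-- '.skycell.' as a list of characters
def patL : List Char := ['.', 's', 'k', 'y', 'c', 'e', 'l', 'l', '.']

-- reference splitter: s.split('.') on char lists, by plain structural recursion
def dsplit : List Char → List (List Char)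
  | [] => [[]]
  | c :: t =>
    if c = '.' then [] :: dsplit t
    else
      match dsplit t with
      | [] => [[c]]
      | h :: tl => (c :: h) :: tl

-- inverse of dsplit: join parts with '.'
def joinDots : List (List Char) → List Char
  | [] => []
  | [p] => p
  | p :: q :: t => p ++ '.' :: joinDots (q :: t)

-- common reference semantics: first part equal to 'skycell' followed by two more parts
def scanC : List (List Char) → List Char × List Char
  | a :: b :: c :: t => if a = skc then (b, c) else scanC (b :: c :: t)
  | _ => ([], [])

-- scanC on the String side (mirrors goA's lookahead)
def scanS : List String → String × String
  | a :: b :: c :: t => if a = "skycell" then (b, c) else scanS (b :: c :: t)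
  | _ => ("", "")

-- char-level body of B
def tailC (tail : List Char) : List Char × List Char :=
  if PySem.Chars.find tail ['.'] = -1 then ([], [])
  else if PySem.Chars.find (tail.drop ((PySem.Chars.find tail ['.']).toNat + 1)) ['.'] = -1 then
    (tail.take (PySem.Chars.find tail ['.']).toNat,
     tail.drop ((PySem.Chars.find tail ['.']).toNat + 1))
  else
    (tail.take (PySem.Chars.find tail ['.']).toNat,
     (tail.drop ((PySem.Chars.find tail ['.']).toNat + 1)).take
       (PySem.Chars.find (tail.drop ((PySem.Chars.find tail ['.']).toNat + 1)) ['.']).toNat)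

def bodyC (cs : List Char) : List Char × List Char :=
  if (skc ++ ['.']).isPrefixOf cs then tailC (cs.drop 8)
  else
    let d := PySem.Chars.find cs patL
    if d = -1 then ([], []) else tailC (cs.drop (d.toNat + 9))

theorem dsplit_ne_nil (l : List Char) : dsplit l ≠ [] := by
  induction l with
  | nil => simp [dsplit]
  | cons c t ih =>
    simp only [dsplit]
    split
    · simp
    · rcases h : dsplit t with _ | ⟨h', tl⟩ <;> simp
theorem joinDots_dsplit (l : List Char) : joinDots (dsplit l) = l := by
  induction l with
  | nil => rfl
  | cons c t ih =>
    simp only [dsplit]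
    split
    · rename_i hc
      subst hc
      rcases h : dsplit t with _ | ⟨h', tl⟩
      · exact absurd h (dsplit_ne_nil t)
      · rw [h] at ih
        simpa [joinDots] using ih
    · rcases h : dsplit t with _ | ⟨h', tl⟩
      · exact absurd h (dsplit_ne_nil t)
      · rw [h] at ih
        rcases tl with _ | ⟨q, t2⟩
        · simpa [joinDots] using ih
        · simpa [joinDots] using ih
theorem dsplit_dotfree (l : List Char) : ∀ p ∈ dsplit l, '.' ∉ p := by
  induction l with
  | nil => simp [dsplit]
  | cons c t ih =>
    simp only [dsplit]
    split
    · intro p hp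
      simp only [List.mem_cons] at hp
      rcases hp with rfl | hp
      · simp
      · exact ih p hp
    · rename_i hc
      rcases h : dsplit t with _ | ⟨h', tl⟩
      · exact absurd h (dsplit_ne_nil t)
      · rw [h] at ih
        intro p hp
        simp only [List.mem_cons] at hp
        rcases hp with rfl | hp
        · intro hmem
          simp only [List.mem_cons] at hmem
          rcases hmem with h1 | h1
          · exact hc h1.symm
          · exact ih h' (List.mem_cons_self) h1
        · exact ih p (List.mem_cons_of_mem _ hp)
def consHead (pre : List Char) : List (List Char) → List (List Char)
  | [] => [pre]
  | h :: t => (pre ++ h) :: t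

theorem splitOn_go_eq (l : List Char) : ∀ (fuel : Nat) (cur : List Char) (acc : List (List Char)),
    l.length < fuel →
    PySem.Chars.splitOn.go ['.'] fuel l cur acc = acc.reverse ++ consHead cur.reverse (dsplit l) := by
  induction l with
  | nil =>
    intro fuel cur acc h
    rcases fuel with _ | f
    · omega
    · simp [PySem.Chars.splitOn.go, dsplit, consHead]
  | cons c t ih =>
    intro fuel cur acc h
    rcases fuel with _ | f
    · omega
    · simp only [PySem.Chars.splitOn.go]
      by_cases hc : c = '.'
      · subst hc
        rw [if_pos (by simp [List.isPrefixOf])]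
        simp only [List.length] at h
        rw [show List.drop ['.'].length ('.' :: t) = t by simp]
        rw [ih f [] (List.reverse cur :: acc) (by omega)]
        simp only [dsplit]
        rcases hd : dsplit t with _ | ⟨h', tl⟩
        · exact absurd hd (dsplit_ne_nil t)
        · simp [consHead]
      · rw [if_neg (by simp [List.isPrefixOf]; exact fun h => hc h.symm)]
        simp only [List.length] at h
        rw [ih f (c :: cur) acc (by omega)]
        simp only [dsplit, if_neg hc]
        rcases hd : dsplit t with _ | ⟨h', tl⟩
        · exact absurd hd (dsplit_ne_nil t)
        · simp [consHead]

theorem splitOn_eq_dsplit (l : List Char) : PySem.Chars.splitOn l ['.'] = dsplit l := by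
  rw [PySem.Chars.splitOn, splitOn_go_eq l (l.length + 1) [] [] (by omega)]
  rcases hd : dsplit l with _ | ⟨h', tl⟩
  · exact absurd hd (dsplit_ne_nil l)
  · simp [consHead]
theorem findGo_nonneg (sub : List Char) (l : List Char) : ∀ (k : Nat),
    PySem.Chars.find.go sub l k = -1 ∨ (k : Int) ≤ PySem.Chars.find.go sub l k := by
  induction l with
  | nil =>
    intro k
    simp only [PySem.Chars.find.go]
    split
    · right; simp
    · left; rfl
  | cons c t ih =>
    intro k
    simp only [PySem.Chars.find.go]
    split
    · right; simp
    · rcases ih (k + 1) with h | h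
      · left; exact h
      · right
        refine le_trans ?_ h
        push_cast; omega
theorem findGo_shift (sub : List Char) (l : List Char) : ∀ (k : Nat),
    PySem.Chars.find.go sub l k =
      if PySem.Chars.find.go sub l 0 = -1 then -1 else PySem.Chars.find.go sub l 0 + k := by
  induction l with
  | nil =>
    intro k
    simp only [PySem.Chars.find.go]
    split
    · simp
    · simp
  | cons c t ih =>
    intro k
    simp only [PySem.Chars.find.go]
    split
    · simp
    · rw [ih (k + 1), ih 1]
      by_cases h : PySem.Chars.find.go sub t 0 = -1
      · simp [h]
      · rcases findGo_nonneg sub t 0 with h' | h'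
        · exact absurd h' h
        · rw [if_neg h, if_neg h, if_neg (by omega)]
          push_cast; ring
theorem findGo_step (w p rest : List Char) (hp : '.' ∉ p) : ∀ (k : Nat),
    PySem.Chars.find.go ('.' :: w) (p ++ rest) k =
      PySem.Chars.find.go ('.' :: w) rest (k + p.length) := by
  induction p with
  | nil => intro k; simp
  | cons c p' ih =>
    intro k
    have hc : c ≠ '.' := fun h => hp (by simp [h])
    have hp' : '.' ∉ p' := fun h => hp (by simp [h])
    simp only [List.cons_append, PySem.Chars.find.go]
    rw [if_neg (by simp [List.isPrefixOf]; intro h; exact absurd h.symm hc)]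
    rw [ih hp' (k + 1)]
    congr 1
    simp; omega
theorem pref_dotfree (w : List Char) (hw : '.' ∉ w) :
    ∀ p rest, '.' ∉ p → (rest = [] ∨ ∃ r, rest = '.' :: r) →
      ((w ++ ['.']) <+: (p ++ rest)) → p = w ∧ ['.'] <+: rest := by
  induction w with
  | nil =>
    intro p rest hp hr hpre
    rcases p with _ | ⟨b, p'⟩
    · simpa using hpre
    · exfalso
      simp only [List.nil_append, List.cons_append] at hpre
      rcases hpre with ⟨t, ht⟩
      simp only [List.cons_append] at ht
      have : '.' = b := by injection ht
      exact hp (by simp [← this])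
  | cons a w' ih =>
    intro p rest hp hr hpre
    have hw' : '.' ∉ w' := fun h => hw (by simp [h])
    have ha : a ≠ '.' := fun h => hw (by simp [h])
    rcases p with _ | ⟨b, p'⟩
    · exfalso
      rcases hr with rfl | ⟨r, rfl⟩
      · rcases hpre with ⟨t, ht⟩
        simp at ht
      · rcases hpre with ⟨t, ht⟩
        simp only [List.cons_append, List.nil_append] at ht
        have : a = '.' := by injection ht
        exact ha this
    · have hp' : '.' ∉ p' := fun h => hp (by simp [h])
      simp only [List.cons_append] at hpre
      rcases hpre with ⟨t, ht⟩
      simp only [List.cons_append, List.cons.injEq] at ht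
      obtain ⟨hab, htl⟩ := ht
      have := ih hw' p' rest hp' hr ⟨t, by simpa using htl⟩
      exact ⟨by rw [hab.symm, this.1], this.2⟩
theorem find_join (b : List Char) (post : List (List Char)) (hb : '.' ∉ b) :
    PySem.Chars.find (joinDots (b :: post)) ['.'] =
      match post with | [] => -1 | _ :: _ => (b.length : Int) := by
  rcases post with _ | ⟨c, post'⟩
  · show PySem.Chars.find b ['.'] = -1
    rw [PySem.Chars.find, show b = b ++ [] by simp, findGo_step [] b [] hb 0]
    simp [PySem.Chars.find.go]
  · show PySem.Chars.find (b ++ '.' :: joinDots (c :: post')) ['.'] = (b.length : Int)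
    rw [PySem.Chars.find, findGo_step [] b _ hb 0]
    simp [PySem.Chars.find.go, List.isPrefixOf]

theorem tailC_join (b : List Char) (post : List (List Char))
    (hdf : ∀ q ∈ b :: post, '.' ∉ q) :
    tailC (joinDots (b :: post)) = match post with | [] => ([], []) | c :: _ => (b, c) := by
  have hb : '.' ∉ b := hdf b (by simp)
  rcases post with _ | ⟨c, post'⟩
  · simp [tailC, find_join b [] hb]
  · have hc : '.' ∉ c := hdf c (by simp)
    have hk := find_join b (c :: post') hb
    simp only at hk
    rw [show joinDots (b :: c :: post') = b ++ '.' :: joinDots (c :: post') from rfl] at hk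
    show tailC (b ++ '.' :: joinDots (c :: post')) = (b, c)
    rw [tailC, hk, if_neg (by omega)]
    have hdrop : (b ++ '.' :: joinDots (c :: post')).drop ((b.length : Int).toNat + 1) =
        joinDots (c :: post') := by
      rw [show (b ++ '.' :: joinDots (c :: post')) = (b ++ ['.']) ++ joinDots (c :: post') by simp]
      rw [show ((b.length : Int)).toNat + 1 = (b ++ ['.']).length + 0 by simp]
      exact List.drop_length_add_append 0
    have htake : (b ++ '.' :: joinDots (c :: post')).take ((b.length : Int)).toNat = b := by
      rw [show ((b.length : Int)).toNat = b.length by simp]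
      exact List.take_left
    rw [hdrop, htake]
    have hm := find_join c post' hc
    rcases post' with _ | ⟨e, post''⟩
    · simp only at hm
      show (if PySem.Chars.find (joinDots [c]) ['.'] = -1 then _ else _) = (b, c)
      rw [hm, if_pos rfl]
      rfl
    · simp only at hm
      rw [hm, if_neg (by omega)]
      show (b, (joinDots (c :: e :: post'')).take _) = (b, c)
      rw [show joinDots (c :: e :: post'') = c ++ '.' :: joinDots (e :: post'') from rfl]
      rw [show ((c.length : Int)).toNat = c.length by simp]
      rw [List.take_left]

theorem skc_dotfree : ('.' : Char) ∉ skc := by decide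

theorem bodyC_join (ps : List (List Char)) (hne : ps ≠ []) (hdf : ∀ q ∈ ps, '.' ∉ q) :
    bodyC (joinDots ps) = scanC ps := by
  induction ps with
  | nil => exact absurd rfl hne
  | cons p ps' ih =>
    have hp : '.' ∉ p := hdf p (by simp)
    rcases ps' with _ | ⟨q, t⟩
    · -- single part: no dot at all, both sides fail
      show bodyC p = ([], [])
      rw [bodyC, if_neg ?nosw]
      case nosw =>
        intro hpre
        obtain ⟨_, h2⟩ := pref_dotfree skc skc_dotfree p [] hp (Or.inl rfl)
          (by rw [List.isPrefixOf_iff_prefix] at hpre; simpa using hpre)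
        simp at h2
      have hd : PySem.Chars.find p patL = -1 := by
        rw [PySem.Chars.find, show p = p ++ [] by simp,
          show patL = '.' :: (skc ++ ['.']) from rfl, findGo_step _ p [] hp 0]
        simp [PySem.Chars.find.go]
      rw [hd, if_pos rfl]
    · have hq : '.' ∉ q := hdf q (by simp)
      have hdf' : ∀ r ∈ q :: t, '.' ∉ r := fun r hr => hdf r (by simp [hr])
      set J := joinDots (q :: t) with hJ
      have hcs : joinDots (p :: q :: t) = p ++ '.' :: J := rfl
      have hJr : J = [] ∨ ∃ r, J = '.' :: r ∨ True := Or.inr ⟨[], Or.inr trivial⟩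
      by_cases hps : p = skc
      · -- startswith branch
        have hsw : (skc ++ ['.']).isPrefixOf (joinDots (p :: q :: t)) = true := by
          rw [hcs, ← hps]
          rw [List.isPrefixOf_iff_prefix]
          exact ⟨J, by simp⟩
        rw [bodyC, if_pos hsw]
        have hdrop : (joinDots (p :: q :: t)).drop 8 = J := by
          rw [hcs, hps, show skc ++ '.' :: J = (skc ++ ['.']) ++ J by simp]
          rw [show (8 : Nat) = (skc ++ ['.']).length + 0 from rfl]
          exact List.drop_length_add_append 0
        rw [hdrop]
        have := tailC_join q t hdf'
        rcases t with _ | ⟨c, t'⟩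
        · simp only at this
          rw [this]
          simp [scanC]
        · simp only at this
          rw [this, hps]
          show (q, c) = scanC (skc :: q :: c :: t')
          simp [scanC]
      · -- p is not 'skycell'
        have hsw : ¬ (skc ++ ['.']).isPrefixOf (joinDots (p :: q :: t)) = true := by
          rw [hcs]
          intro hpre
          rw [List.isPrefixOf_iff_prefix] at hpre
          obtain ⟨h1, _⟩ := pref_dotfree skc skc_dotfree p ('.' :: J) hp (Or.inr ⟨J, rfl⟩) hpre
          exact hps h1
        rw [bodyC, if_neg hsw, hcs]
        have hstep : PySem.Chars.find (p ++ '.' :: J) patL =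
            if patL.isPrefixOf ('.' :: J) then (p.length : Int)
            else PySem.Chars.find.go patL J (p.length + 1) := by
          rw [PySem.Chars.find, show patL = '.' :: (skc ++ ['.']) from rfl, findGo_step _ p _ hp 0]
          rw [PySem.Chars.find.go.eq_def]
          simp only [Nat.zero_add]
        rcases t with _ | ⟨c, t'⟩
        · -- exactly two parts: the candidate has no part after the projection, both fail
          have hJq : J = q := rfl
          have hnp : ¬ patL.isPrefixOf ('.' :: J) = true := by
            show ¬ ('.' :: (skc ++ ['.'])).isPrefixOf ('.' :: J) = true
            intro hpre
            rw [List.isPrefixOf_iff_prefix] at hpre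
            have hpre' : (skc ++ ['.']) <+: J := by
              rcases hpre with ⟨r, hr⟩
              exact ⟨r, by simpa using hr⟩
            obtain ⟨_, h2⟩ := pref_dotfree skc skc_dotfree q [] hq (Or.inl rfl)
              (by rw [hJq] at hpre'; simpa using hpre')
            simp at h2
          rw [hstep, if_neg hnp]
          have hend : PySem.Chars.find.go patL J (p.length + 1) = -1 := by
            rw [hJq, show q = q ++ [] by simp,
              show patL = '.' :: (skc ++ ['.']) from rfl, findGo_step _ q [] hq (p.length + 1)]
            simp [PySem.Chars.find.go]
          rw [hend, if_pos rfl]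
          rfl
        · have hJd : J = q ++ '.' :: joinDots (c :: t') := rfl
          have hdfc : ∀ r ∈ c :: t', '.' ∉ r := fun r hr => hdf r (by simp [hr])
          by_cases hqs : q = skc
          · -- the first 'skycell' part sits right after p
            have hpp : patL.isPrefixOf ('.' :: J) = true := by
              show ('.' :: (skc ++ ['.'])).isPrefixOf ('.' :: J) = true
              rw [List.isPrefixOf_iff_prefix]
              refine ⟨joinDots (c :: t'), ?_⟩
              rw [hJd, hqs]
              simp
            rw [hstep, if_pos hpp, if_neg (by omega)]
            have hdd : (p ++ '.' :: J).drop (((p.length : Int)).toNat + 9) = joinDots (c :: t') := by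
              rw [show ((p.length : Int)).toNat = p.length by simp,
                show p ++ '.' :: J = (p ++ ['.']) ++ J by simp,
                show p.length + 9 = (p ++ ['.']).length + 8 by simp,
                List.drop_length_add_append 8, hJd, hqs]
              rw [show skc ++ '.' :: joinDots (c :: t') = (skc ++ ['.']) ++ joinDots (c :: t') by simp,
                show (8 : Nat) = (skc ++ ['.']).length + 0 from rfl,
                List.drop_length_add_append 0, List.drop_zero]
            rw [hdd]
            have := tailC_join c t' hdfc
            rcases t' with _ | ⟨e, t2⟩
            · simp only at this
              rw [this, hqs]
              simp [scanC, hps]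
            · simp only at this
              rw [this, hqs]
              simp [scanC, hps]
          · -- no 'skycell' at the first two positions: step to the rest of the parts
            have hnp : ¬ patL.isPrefixOf ('.' :: J) = true := by
              show ¬ ('.' :: (skc ++ ['.'])).isPrefixOf ('.' :: J) = true
              intro hpre
              rw [List.isPrefixOf_iff_prefix] at hpre
              have hpre' : (skc ++ ['.']) <+: J := by
                rcases hpre with ⟨r, hr⟩
                exact ⟨r, by simpa using hr⟩
              rw [hJd] at hpre'
              obtain ⟨h1, _⟩ := pref_dotfree skc skc_dotfree q ('.' :: joinDots (c :: t')) hq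
                (Or.inr ⟨_, rfl⟩) hpre'
              exact hqs h1
            rw [hstep, if_neg hnp]
            have hIH := ih (by simp) hdf'
            have hswJ : ¬ (skc ++ ['.']).isPrefixOf J = true := by
              intro hpre
              rw [List.isPrefixOf_iff_prefix, hJd] at hpre
              obtain ⟨h1, _⟩ := pref_dotfree skc skc_dotfree q ('.' :: joinDots (c :: t')) hq
                (Or.inr ⟨_, rfl⟩) hpre
              exact hqs h1
            rw [bodyC, if_neg hswJ] at hIH
            have hfindJ : PySem.Chars.find J patL = PySem.Chars.find.go patL J 0 := rfl
            rw [findGo_shift patL J (p.length + 1), ← hfindJ]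
            by_cases hd0 : PySem.Chars.find J patL = -1
            · rw [if_pos hd0, if_pos rfl]
              rw [hd0, if_pos rfl] at hIH
              show ([], []) = scanC (p :: q :: c :: t')
              rw [hIH]
              simp only [scanC, if_neg hps]
            · have hd0n : 0 ≤ PySem.Chars.find J patL := by
                rcases findGo_nonneg patL J 0 with h | h
                · exact absurd h hd0
                · simpa [hfindJ] using h
              rw [if_neg hd0, if_neg (by omega)]
              rw [if_neg hd0] at hIH
              have hdd : (p ++ '.' :: J).drop
                  ((PySem.Chars.find J patL + ((p.length + 1 : Nat) : Int)).toNat + 9) =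
                  J.drop ((PySem.Chars.find J patL).toNat + 9) := by
                rw [show p ++ '.' :: J = (p ++ ['.']) ++ J by simp]
                rw [show (PySem.Chars.find J patL + ((p.length + 1 : Nat) : Int)).toNat + 9 =
                  (p ++ ['.']).length + ((PySem.Chars.find J patL).toNat + 9) by
                    simp only [List.length_append, List.length_cons, List.length_nil]
                    omega]
                exact List.drop_length_add_append _
              rw [hdd, hIH]
              simp only [scanC, if_neg hps]

theorem ofList_nil : String.ofList [] = "" := by decide
theorem toList_dot : ".".toList = ['.'] := by decide
theorem toList_sk : "skycell.".toList = skc ++ ['.'] := by decide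
theorem toList_pat : ".skycell.".toList = patL := by decide
theorem ofList_skc : String.ofList skc = "skycell" := by decide

theorem find_nonneg_of_ne (l sub : List Char) (h : PySem.Chars.find l sub ≠ -1) :
    0 ≤ PySem.Chars.find l sub := by
  rcases findGo_nonneg sub l 0 with h' | h'
  · exact absurd h' h
  · exact_mod_cast h'

theorem str_slice_from (s : String) (a : Int) (h0 : 0 ≤ a) :
    PySem.Str.slice s (some a) none = String.ofList (s.toList.drop a.toNat) := by
  rw [PySem.Str.slice]
  congr 1
  rw [PySem.Chars.slice_eq_listSlice, PySem.List.slice_from _ h0]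

theorem str_slice_to (s : String) (b : Int) (h0 : 0 ≤ b) :
    PySem.Str.slice s none (some b) = String.ofList (s.toList.take b.toNat) := by
  rw [PySem.Str.slice]
  congr 1
  rw [PySem.Chars.slice_eq_listSlice, PySem.List.slice_to _ h0]

theorem altFrom_eq (s : String) (start : Int) (h0 : 0 ≤ start) :
    altFrom s start =
      (String.ofList (tailC (s.toList.drop start.toNat)).1,
       String.ofList (tailC (s.toList.drop start.toNat)).2) := by
  simp only [altFrom, tailC]
  rw [str_slice_from s start h0]
  have htl : (String.ofList (s.toList.drop start.toNat)).toList = s.toList.drop start.toNat :=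
    String.toList_ofList
  have hfind : PySem.Str.find (String.ofList (s.toList.drop start.toNat)) "." =
      PySem.Chars.find (s.toList.drop start.toNat) ['.'] := by
    rw [PySem.Str.find, htl, toList_dot]
  rw [hfind]
  by_cases hk : PySem.Chars.find (s.toList.drop start.toNat) ['.'] = -1
  · rw [if_pos hk, if_pos hk, ofList_nil]
  · rw [if_neg hk, if_neg hk]
    have hk0 : 0 ≤ PySem.Chars.find (s.toList.drop start.toNat) ['.'] :=
      find_nonneg_of_ne _ _ hk
    set K := PySem.Chars.find (s.toList.drop start.toNat) ['.'] with hK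
    have hrest : PySem.Str.slice (String.ofList (s.toList.drop start.toNat)) (some (K + 1)) none =
        String.ofList ((s.toList.drop start.toNat).drop (K.toNat + 1)) := by
      rw [str_slice_from _ _ (by omega), htl]
      congr 2
      omega
    rw [hrest]
    have htl2 : (String.ofList ((s.toList.drop start.toNat).drop (K.toNat + 1))).toList =
        (s.toList.drop start.toNat).drop (K.toNat + 1) := String.toList_ofList
    have hfind2 : PySem.Str.find
        (String.ofList ((s.toList.drop start.toNat).drop (K.toNat + 1))) "." =
        PySem.Chars.find ((s.toList.drop start.toNat).drop (K.toNat + 1)) ['.'] := by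
      rw [PySem.Str.find, htl2, toList_dot]
    rw [hfind2]
    have htake : PySem.Str.slice (String.ofList (s.toList.drop start.toNat)) none (some K) =
        String.ofList ((s.toList.drop start.toNat).take K.toNat) := by
      rw [str_slice_to _ _ hk0, htl]
    by_cases hm : PySem.Chars.find ((s.toList.drop start.toNat).drop (K.toNat + 1)) ['.'] = -1
    · rw [if_pos hm, if_pos hm, htake]
    · rw [if_neg hm, if_neg hm, htake]
      have hm0 : 0 ≤ PySem.Chars.find ((s.toList.drop start.toNat).drop (K.toNat + 1)) ['.'] :=
        find_nonneg_of_ne _ _ hm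
      rw [str_slice_to _ _ hm0, htl2]

theorem alt_eq_body (s : String) :
    parse_skycell_name_alt s =
      (String.ofList (bodyC s.toList).1, String.ofList (bodyC s.toList).2) := by
  simp only [parse_skycell_name_alt, bodyC]
  have hsw : PySem.Str.startswith s "skycell." = (skc ++ ['.']).isPrefixOf s.toList := by
    rw [PySem.Str.startswith, toList_sk, PySem.Chars.startswith]
  by_cases h : (skc ++ ['.']).isPrefixOf s.toList = true
  · rw [hsw, if_pos h, if_pos h, altFrom_eq s 8 (by omega)]
    rfl
  · rw [hsw, if_neg h, if_neg h]
    have hfd : PySem.Str.find s ".skycell." = PySem.Chars.find s.toList patL := by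
      rw [PySem.Str.find, toList_pat]
    rw [hfd]
    by_cases hd : PySem.Chars.find s.toList patL = -1
    · rw [if_pos hd, if_pos hd, ofList_nil]
    · rw [if_neg hd, if_neg hd]
      have hd0 : 0 ≤ PySem.Chars.find s.toList patL := find_nonneg_of_ne _ _ hd
      rw [altFrom_eq s _ (by omega),
        show (PySem.Chars.find s.toList patL + 9).toNat =
          (PySem.Chars.find s.toList patL).toNat + 9 by omega]

theorem goA_eq_scanS (full : List String) :
    ∀ rest i, full.drop i = rest → goA full i rest = scanS rest := by
  intro rest
  induction rest with
  | nil => intro i h; rfl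
  | cons part rest' ih =>
    intro i h
    have hlen : full.length - i = rest'.length + 1 := by
      have := congrArg List.length h
      simpa using this
    have hi : i < full.length := by omega
    have hdrop' : full.drop (i + 1) = rest' := by
      have := congrArg List.tail h
      simpa [List.tail_drop] using this
    rw [goA]
    by_cases hc : part = "skycell" ∧ (i : Int) + 2 < PySem.List.len full
    · rw [if_pos hc]
      obtain ⟨hc1, hc2⟩ := hc
      rw [PySem.List.len_eq] at hc2
      have h2 : 2 ≤ rest'.length := by omega
      rcases rest' with _ | ⟨b, rest''⟩
      · simp at h2
      rcases rest'' with _ | ⟨c, r3⟩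
      · simp at h2
      have hdrop'' : full.drop (i + 2) = c :: r3 := by
        have := congrArg List.tail hdrop'
        simpa [List.tail_drop] using this
      have hb : PySem.List.pyGetD full ((i : Int) + 1) "" = b := by
        rw [show ((i : Int) + 1) = ((i + 1 : Nat) : Int) by push_cast; ring,
          PySem.List.pyGetD_natCast]
        have : full[i + 1]? = some b := by
          have h0 : (List.drop (i + 1) full)[0]? = full[(i + 1) + 0]? := List.getElem?_drop
          rw [hdrop'] at h0
          simpa using h0.symm
        simp [List.getD, this]
      have hcc : PySem.List.pyGetD full ((i : Int) + 2) "" = c := by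
        rw [show ((i : Int) + 2) = ((i + 2 : Nat) : Int) by push_cast; ring,
          PySem.List.pyGetD_natCast]
        have : full[i + 2]? = some c := by
          have h0 : (List.drop (i + 2) full)[0]? = full[(i + 2) + 0]? := List.getElem?_drop
          rw [hdrop''] at h0
          simpa using h0.symm
        simp [List.getD, this]
      rw [hb, hcc]
      simp [scanS, hc1]
    · rw [if_neg hc, ih (i + 1) hdrop']
      rcases rest' with _ | ⟨b, rest''⟩
      · rfl
      rcases rest'' with _ | ⟨c, r3⟩
      · rfl
      have hps : ¬ part = "skycell" := by
        intro hp
        apply hc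
        refine ⟨hp, ?_⟩
        rw [PySem.List.len_eq]
        have hlen' : full.length = i + r3.length + 3 := by
          simp only [List.length_cons] at hlen
          omega
        rw [hlen']
        push_cast
        omega
      simp [scanS, hps]

theorem scanS_map (ps : List (List Char)) :
    scanS (ps.map String.ofList) =
      (String.ofList (scanC ps).1, String.ofList (scanC ps).2) := by
  induction ps with
  | nil => simp [scanS, scanC]
  | cons a t ih =>
    rcases t with _ | ⟨b, t'⟩
    · simp [scanS, scanC]
    rcases t' with _ | ⟨c, t''⟩
    · simp [scanS, scanC]
    by_cases ha : a = skc
    · subst ha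
      simp [scanS, scanC, ofList_skc]
    · have ha' : ¬ String.ofList a = "skycell" := by
        intro h
        apply ha
        have := congrArg String.toList h
        rw [String.toList_ofList] at this
        rw [this]
        decide
      simp only [List.map_cons, scanS, scanC, if_neg ha, if_neg ha']
      simpa using ih

theorem a_eq_scan (s : String) :
    parse_skycell_name s =
      (String.ofList (scanC (dsplit s.toList)).1, String.ofList (scanC (dsplit s.toList)).2) := by
  have hsplit : PySem.Str.split? s "." = some ((dsplit s.toList).map String.ofList) := by
    rw [PySem.Str.split?, toList_dot, PySem.Chars.split?]
    rw [if_neg (by simp)]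
    rw [Option.map_some, splitOn_eq_dsplit]
  simp only [parse_skycell_name, hsplit, Option.getD_some]
  rw [goA_eq_scanS _ _ 0 (by simp), scanS_map]

-- ===== VERDICT (by name: the statement is the Claim_ definition above) =====
theorem parse_skycell_name_spec : Claim_equal_parse_skycell_name := by
  intro filename _ _
  unfold Spec_parse_skycell_name
  rw [a_eq_scan, alt_eq_body]
  conv_rhs => rw [← joinDots_dsplit filename.toList]
  rw [bodyC_join _ (dsplit_ne_nil _) (dsplit_dotfree _)]
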